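-- pv_equiv track=rewrite | github.com/MathDEV-0/smellhunter-graph-similarity | main.py | partition_nodes
-- ===== SOURCE A (Python) =====
-- def partition_nodes(num_groups, size):
--
--     nodes = list(range(size))
--     nodes = sorted(nodes)
--
--     partitions = {}
--
--     group_size = max(1, size // num_groups)
--
--     for i in range(num_groups):
--
--         start = i * group_size
--
--         if i == num_groups - 1:
--             partitions[i] = nodes[start:]
--         else:
--             partitions[i] = nodes[start:start + group_size]
--
--     return partitions
-- ===== SOURCE B (Python) =====
-- def partition_nodes(num_groups, size):
--     group_size = max(1, size // num_groups)
--     partitions = {i: [] for i in range(num_groups)}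
--     last = num_groups - 1
--     for n in range(size):
--         partitions[min(n // group_size, last)].append(n)
--     return partitions
-- ===== Notes on version B (the rewrite author's own statement) =====
-- stated objective: alternative
-- what changed: Replaces A's loop over groups that slices a pre-built sorted node list with pre-created empty buckets and a single pass over the nodes routing each node n to bucket min(n // group_size, num_groups - 1).
-- outside the precondition, e.g. on partition_nodes(-2, 3): A returns {}, B raises KeyError
import Mathlib
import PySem

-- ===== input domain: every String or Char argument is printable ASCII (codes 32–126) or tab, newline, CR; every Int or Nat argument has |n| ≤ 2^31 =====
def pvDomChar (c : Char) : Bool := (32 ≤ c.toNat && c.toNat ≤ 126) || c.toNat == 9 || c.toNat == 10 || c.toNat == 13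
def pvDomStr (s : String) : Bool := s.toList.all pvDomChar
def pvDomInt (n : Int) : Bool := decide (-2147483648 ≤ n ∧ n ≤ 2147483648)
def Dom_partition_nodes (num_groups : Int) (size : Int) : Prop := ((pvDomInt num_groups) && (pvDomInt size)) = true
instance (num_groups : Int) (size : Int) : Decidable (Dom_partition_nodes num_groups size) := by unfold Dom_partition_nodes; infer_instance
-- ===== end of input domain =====

-- B replaces A's loop-over-groups-with-slices by pre-created empty buckets and a single pass
-- over the nodes routing each node n to bucket min(n // group_size, num_groups - 1) (alternative decomposition, same cost).


-- ===== PORT A =====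
def partition_nodes (num_groups : Int) (size : Int) : List (Int × List Int) :=
  let nodes := PySem.List.pyRange 0 size
  let nodes := PySem.List.sorted nodes (fun x => x)
  let group_size := max 1 (PySem.Int.floordiv size num_groups)
  let d := (PySem.List.pyRange 0 num_groups).foldl (fun d i =>
      let start := i * group_size
      if i == num_groups - 1 then d.insert i (PySem.List.slice nodes (some start) none)
      else d.insert i (PySem.List.slice nodes (some start) (some (start + group_size))))
    PySem.Dict.empty
  d.items

-- ===== PORT B =====
def partition_nodes_alt (num_groups : Int) (size : Int) : List (Int × List Int) :=
  let group_size := max 1 (PySem.Int.floordiv size num_groups)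
  let d := (PySem.List.pyRange 0 num_groups).foldl
      (fun d i => d.insert i ([] : List Int)) PySem.Dict.empty
  let last := num_groups - 1
  let d := (PySem.List.pyRange 0 size).foldl
      (fun d n => d.modify (min (PySem.Int.floordiv n group_size) last) [] (fun l => l ++ [n])) d
  d.items

-- ===== PRECONDITION & SPEC =====
-- Pre_ excludes num_groups = 0, where A raises ZeroDivisionError, and the nonsensical corner
-- num_groups < 0 with size > 0, where A returns {} only because its group loop is empty while
-- B's bucket routing raises KeyError.
def Pre_partition_nodes (num_groups : Int) (size : Int) : Prop :=
  0 < num_groups ∨ (num_groups < 0 ∧ size ≤ 0)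
instance (num_groups : Int) (size : Int) : Decidable (Pre_partition_nodes num_groups size) := by unfold Pre_partition_nodes; infer_instance
def pvWitness_partition_nodes : Int × Int := (3, 7)

def Spec_partition_nodes (num_groups : Int) (size : Int) (out : List (Int × List Int)) : Prop := out = partition_nodes_alt num_groups size
instance (num_groups : Int) (size : Int) (out : List (Int × List Int)) : Decidable (Spec_partition_nodes num_groups size out) := by unfold Spec_partition_nodes; infer_instance

-- ===== CLAIM (what is proved, stated in full; the proofs are below) =====
def Claim_equal_partition_nodes : Prop := ∀ (num_groups : Int) (size : Int), Dom_partition_nodes num_groups size → Pre_partition_nodes num_groups size → Spec_partition_nodes num_groups size (partition_nodes num_groups size)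

-- ===== LEMMAS AND PROOFS =====

lemma pyRange_nil {lo hi : Int} (h : hi ≤ lo) : PySem.List.pyRange lo hi = [] := by
  simp [PySem.List.pyRange, show ¬ lo < hi by omega]

lemma pyRange_drop (k : Nat) : ∀ (lo hi : Int),
    (PySem.List.pyRange lo hi).drop k = PySem.List.pyRange (lo + k) hi := by
  induction k with
  | zero => intro lo hi; simp
  | succ k ih =>
    intro lo hi
    by_cases h : lo < hi
    · rw [PySem.List.pyRange_one_cons h, List.drop_succ_cons, ih]
      congr 1; push_cast; ring
    · rw [pyRange_nil (lo := lo) (hi := hi) (by omega),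
        pyRange_nil (lo := lo + ((k + 1 : Nat) : Int)) (hi := hi) (by push_cast; omega),
        List.drop_nil]

lemma pyRange_take (k : Nat) : ∀ (lo hi : Int),
    (PySem.List.pyRange lo hi).take k = PySem.List.pyRange lo (min hi (lo + k)) := by
  induction k with
  | zero =>
    intro lo hi
    rw [List.take_zero, pyRange_nil (lo := lo) (hi := min hi (lo + (0 : Nat))) (by omega)]
  | succ k ih =>
    intro lo hi
    by_cases h : lo < hi
    · rw [PySem.List.pyRange_one_cons h, List.take_succ_cons, ih (lo + 1) hi,
        show min hi (lo + 1 + (k : Int)) = min hi (lo + ((k + 1 : Nat) : Int)) by push_cast; omega,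
        PySem.List.pyRange_one_cons (a := lo) (b := min hi (lo + ((k + 1 : Nat) : Int)))
          (by push_cast; omega)]
    · rw [pyRange_nil (lo := lo) (hi := hi) (by omega),
        pyRange_nil (lo := lo) (hi := min hi (lo + ((k + 1 : Nat) : Int))) (by omega),
        List.take_nil]

lemma pyRange_filter_interval (k : Nat) : ∀ (lo hi a b : Int), (hi - lo).toNat ≤ k →
    (PySem.List.pyRange lo hi).filter (fun n => decide (a ≤ n ∧ n < b))
      = PySem.List.pyRange (max lo a) (min hi b) := by
  induction k with
  | zero =>
    intro lo hi a b hk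
    rw [pyRange_nil (lo := lo) (hi := hi) (by omega),
      pyRange_nil (lo := max lo a) (hi := min hi b) (by omega), List.filter_nil]
  | succ k ih =>
    intro lo hi a b hk
    by_cases h : lo < hi
    · rw [PySem.List.pyRange_one_cons h, List.filter_cons]
      by_cases hp : a ≤ lo ∧ lo < b
      · rw [if_pos (by simpa using hp), ih (lo + 1) hi a b (by omega),
          show max (lo + 1) a = lo + 1 by omega, show max lo a = lo by omega,
          PySem.List.pyRange_one_cons (a := lo) (b := min hi b) (by omega)]
      · rw [if_neg (by simpa using hp), ih (lo + 1) hi a b (by omega)]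
        by_cases ha : a ≤ lo
        · rw [pyRange_nil (lo := max (lo + 1) a) (hi := min hi b) (by omega),
            pyRange_nil (lo := max lo a) (hi := min hi b) (by omega)]
        · congr 1; omega
    · rw [pyRange_nil (lo := lo) (hi := hi) (by omega),
        pyRange_nil (lo := max lo a) (hi := min hi b) (by omega), List.filter_nil]

lemma pairwise_pyRange (k : Nat) : ∀ (lo hi : Int), (hi - lo).toNat ≤ k →
    List.Pairwise (· < ·) (PySem.List.pyRange lo hi) := by
  induction k with
  | zero => intro lo hi hk; rw [pyRange_nil (by omega)]; exact List.Pairwise.nil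
  | succ k ih =>
    intro lo hi hk
    by_cases h : lo < hi
    · rw [PySem.List.pyRange_one_cons h]
      exact List.Pairwise.cons
        (fun x hx => by have := PySem.List.mem_pyRange_one.mp hx; omega)
        (ih (lo + 1) hi (by omega))
    · rw [pyRange_nil (by omega)]; exact List.Pairwise.nil

lemma nodup_pyRange (lo hi : Int) : (PySem.List.pyRange lo hi).Nodup :=
  (pairwise_pyRange (hi - lo).toNat lo hi le_rfl).imp Int.ne_of_lt

lemma sorted_pyRange (s : Int) :
    PySem.List.sorted (PySem.List.pyRange 0 s) (fun x => x) = PySem.List.pyRange 0 s :=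
  PySem.List.sorted_eq_of_perm_of_pairwise_lt _ _ _ (List.Perm.refl _)
    (pairwise_pyRange (s - 0).toNat 0 s le_rfl)

lemma set_update_of_mem {α : Type} [BEq α] [LawfulBEq α] (xs : List α) :
    ∀ (s : PySem.Set α), (∀ x ∈ xs, x ∈ s) → PySem.Set.update s xs = s := by
  induction xs with
  | nil => intro s _; rfl
  | cons x xs ih =>
    intro s h
    have hx : PySem.Set.add s x = s := by
      simp [PySem.Set.add, PySem.Set.contains]
      exact h x (by simp)
    show PySem.Set.update (PySem.Set.add s x) xs = s
    rw [hx]; exact ih s (fun y hy => h y (by simp [hy]))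

-- a bucket-routing loop over a dict whose keys already cover every routed key, as a map over the keys
lemma modify_fold_items (gval : Int → Int) (l : List Int) (d0 : PySem.Dict Int (List Int))
    (hnd : d0.keys.Nodup) (hmem : ∀ n ∈ l, gval n ∈ d0.keys) :
    (l.foldl (fun d n => d.modify (gval n) [] (fun t => t ++ [n])) d0).items
      = d0.keys.map (fun k => (k, d0.getD k [] ++ l.filter (fun n => gval n == k))) := by
  have h1 : l.foldl (fun d n => d.modify (gval n) [] (fun t => t ++ [n])) d0
      = (l.map (fun n => (gval n, n))).foldl
          (fun d p => d.modify p.1 [] (fun t => t ++ [p.2])) d0 := by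
    rw [List.foldl_map]
  rw [h1]
  have hkeys : ((l.map (fun n => (gval n, n))).foldl
      (fun d p => d.modify p.1 [] (fun t => t ++ [p.2])) d0).keys = d0.keys := by
    rw [PySem.Dict.keys_foldl_modify_key]
    apply set_update_of_mem
    intro x hx
    simp only [List.map_map, List.mem_map, Function.comp] at hx
    obtain ⟨n, hn, rfl⟩ := hx
    exact hmem n hn
  have hnd' : ((l.map (fun n => (gval n, n))).foldl
      (fun d p => d.modify p.1 [] (fun t => t ++ [p.2])) d0).keys.Nodup := by
    rw [hkeys]; exact hnd
  rw [PySem.Dict.items_eq_map_keys _ hnd' [], hkeys]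
  apply List.map_congr_left
  intro k _
  rw [PySem.Dict.getD_foldl_modify_append]
  congr 1
  simp [List.filter_map, List.map_map, Function.comp_def]

-- A's result as a map over the group range
lemma partA_items (g s : Int) (hg : 0 < g) :
    partition_nodes g s = (PySem.List.pyRange 0 g).map (fun i =>
      (i, if i == g - 1
          then PySem.List.slice (PySem.List.pyRange 0 s) (some (i * max 1 (PySem.Int.floordiv s g))) none
          else PySem.List.slice (PySem.List.pyRange 0 s) (some (i * max 1 (PySem.Int.floordiv s g)))
                (some (i * max 1 (PySem.Int.floordiv s g) + max 1 (PySem.Int.floordiv s g))))) := by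
  simp only [partition_nodes]
  rw [sorted_pyRange]
  rw [PySem.List.foldl_congr_mem _ _ (fun d i => d.insert i
      (if i == g - 1
       then PySem.List.slice (PySem.List.pyRange 0 s) (some (i * max 1 (PySem.Int.floordiv s g))) none
       else PySem.List.slice (PySem.List.pyRange 0 s) (some (i * max 1 (PySem.Int.floordiv s g)))
            (some (i * max 1 (PySem.Int.floordiv s g) + max 1 (PySem.Int.floordiv s g))))) _
      (by intro acc x _; by_cases h : x = g - 1 <;> simp [h])]
  rw [PySem.Dict.items_foldl_insert_fresh _ (fun i => i)
      (fun i => if i == g - 1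
        then PySem.List.slice (PySem.List.pyRange 0 s) (some (i * max 1 (PySem.Int.floordiv s g))) none
        else PySem.List.slice (PySem.List.pyRange 0 s) (some (i * max 1 (PySem.Int.floordiv s g)))
              (some (i * max 1 (PySem.Int.floordiv s g) + max 1 (PySem.Int.floordiv s g)))) _
      (by intro a _; exact PySem.Dict.contains_empty a)
      (by simpa using nodup_pyRange 0 g)]
  rfl

-- B's result as a map over the group range
lemma partB_items (g s : Int) (hg : 0 < g) :
    partition_nodes_alt g s = (PySem.List.pyRange 0 g).map (fun i =>
      (i, (PySem.List.pyRange 0 s).filter (fun n =>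
            min (PySem.Int.floordiv n (max 1 (PySem.Int.floordiv s g))) (g - 1) == i))) := by
  simp only [partition_nodes_alt]
  have hinit : ((PySem.List.pyRange 0 g).foldl
      (fun d i => d.insert i ([] : List Int)) PySem.Dict.empty).items
      = (PySem.List.pyRange 0 g).map (fun i => (i, ([] : List Int))) := by
    rw [PySem.Dict.items_foldl_insert_fresh _ (fun i => i) (fun _ => ([] : List Int)) _
        (by intro a _; exact PySem.Dict.contains_empty a)
        (by simpa using nodup_pyRange 0 g)]
    rfl
  have hkeys0 : ((PySem.List.pyRange 0 g).foldl
      (fun d i => d.insert i ([] : List Int)) PySem.Dict.empty).keys = PySem.List.pyRange 0 g := by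
    simp [PySem.Dict.keys, hinit, Function.comp_def]
  have hnd0 : ((PySem.List.pyRange 0 g).foldl
      (fun d i => d.insert i ([] : List Int)) PySem.Dict.empty).keys.Nodup := by
    rw [hkeys0]; exact nodup_pyRange 0 g
  rw [modify_fold_items _ _ _ hnd0 (by
    intro n hn
    obtain ⟨hn0, hns⟩ := PySem.List.mem_pyRange_one.mp hn
    have h0 : 0 ≤ PySem.Int.floordiv n (max 1 (PySem.Int.floordiv s g)) :=
      (PySem.Int.le_floordiv_iff_mul_le (by omega)).mpr (by omega)
    rw [hkeys0]
    exact PySem.List.mem_pyRange_one.mpr (by omega))]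
  rw [hkeys0]
  apply List.map_congr_left
  intro i hi
  have hgetD0 : ((PySem.List.pyRange 0 g).foldl
      (fun d i => d.insert i ([] : List Int)) PySem.Dict.empty).getD i [] = [] := by
    apply PySem.Dict.getD_of_mem_items _ _ hnd0
    rw [hinit]
    exact List.mem_map.mpr ⟨i, hi, rfl⟩
  rw [hgetD0, List.nil_append]

-- the slice A takes for group i equals the list of nodes B routes to bucket i
lemma bucket_eq_slice (g s i : Int) (hg : 0 < g) (hi : i ∈ PySem.List.pyRange 0 g) :
    (if i == g - 1
     then PySem.List.slice (PySem.List.pyRange 0 s) (some (i * max 1 (PySem.Int.floordiv s g))) none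
     else PySem.List.slice (PySem.List.pyRange 0 s) (some (i * max 1 (PySem.Int.floordiv s g)))
          (some (i * max 1 (PySem.Int.floordiv s g) + max 1 (PySem.Int.floordiv s g))))
    = (PySem.List.pyRange 0 s).filter (fun n =>
        min (PySem.Int.floordiv n (max 1 (PySem.Int.floordiv s g))) (g - 1) == i) := by
  obtain ⟨hi0, hig⟩ := PySem.List.mem_pyRange_one.mp hi
  set gs := max 1 (PySem.Int.floordiv s g) with hgs
  have hgs1 : (1 : Int) ≤ gs := le_max_left _ _
  have hstart : 0 ≤ i * gs := mul_nonneg hi0 (by omega)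
  by_cases hlast : i = g - 1
  · rw [if_pos (by simp [hlast]), PySem.List.slice_from _ hstart, pyRange_drop,
      show (0 : Int) + ((i * gs).toNat : Int) = i * gs by omega]
    have hfc : (PySem.List.pyRange 0 s).filter (fun n =>
        min (PySem.Int.floordiv n gs) (g - 1) == i)
        = (PySem.List.pyRange 0 s).filter (fun n => decide (i * gs ≤ n ∧ n < s)) := by
      apply List.filter_congr
      intro n hn
      obtain ⟨hn0, hns⟩ := PySem.List.mem_pyRange_one.mp hn
      have hb := PySem.Int.le_floordiv_iff_mul_le (a := n) (b := gs) (q := g - 1) (by omega)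
      rw [Bool.eq_iff_iff]
      simp only [beq_iff_eq, decide_eq_true_eq]
      rw [hlast] at *
      omega
    rw [hfc, pyRange_filter_interval (s - 0).toNat 0 s (i * gs) s le_rfl]
    congr 1 <;> omega
  · rw [if_neg (by simpa using hlast), PySem.List.slice_toNat _ hstart (by omega),
      pyRange_drop, show (0 : Int) + ((i * gs).toNat : Int) = i * gs by omega, pyRange_take]
    have hfc : (PySem.List.pyRange 0 s).filter (fun n =>
        min (PySem.Int.floordiv n gs) (g - 1) == i)
        = (PySem.List.pyRange 0 s).filter (fun n => decide (i * gs ≤ n ∧ n < i * gs + gs)) := by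
      apply List.filter_congr
      intro n hn
      obtain ⟨hn0, hns⟩ := PySem.List.mem_pyRange_one.mp hn
      have hb := PySem.Int.floordiv_eq_iff_of_pos (a := n) (b := gs) (q := i) (by omega)
      rw [add_mul, one_mul] at hb
      rw [Bool.eq_iff_iff]
      simp only [beq_iff_eq, decide_eq_true_eq]
      omega
    rw [hfc, pyRange_filter_interval (s - 0).toNat 0 s (i * gs) (i * gs + gs) le_rfl]
    congr 1
    · omega
    · omega

-- ===== VERDICT (by name: the statement is the Claim_ definition above) =====
theorem partition_nodes_spec : Claim_equal_partition_nodes := by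
  intro g s _ hpre
  unfold Spec_partition_nodes
  rcases hpre with hg | ⟨hgneg, hs⟩
  · rw [partA_items g s hg, partB_items g s hg]
    apply List.map_congr_left
    intro i hi
    exact congrArg _ (bucket_eq_slice g s i hg hi)
  · simp only [partition_nodes, partition_nodes_alt]
    rw [sorted_pyRange, pyRange_nil (lo := 0) (hi := g) (by omega),
      pyRange_nil (lo := 0) (hi := s) (by omega)]
    rfl
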